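-- pv_equiv track=rewrite | github.com/Andrea-1704/MLN | Rules.py | rule_friends_logic
-- ===== SOURCE A (Python) =====
-- def rule_friends_logic(world, constants):
--     """
--     For all pairs (x,y):
--         If Friends(x,y) is true, then check if Smokes(x) == Smokes(y)
--     Count how many such implications are satisfied. It returns the ni(x) value.
--     """
--     count_satisfied = 0
--     for x in constants:
--         for y in constants:
--             # Retrieve truth values from the current world
--             friends_xy = world.get(f"Friends({x},{y})", False) # Default False if not present
--             smokes_x = world.get(f"Smokes({x})", False)
--             smokes_y = world.get(f"Smokes({y})", False)
--
--             # Logic: A => B is equivalent to (NOT A) OR B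
--             # Here B is (smokes_x == smokes_y)
--             is_satisfied = (not friends_xy) or (smokes_x == smokes_y)
--
--             if is_satisfied:
--                 count_satisfied += 1
--     return count_satisfied
-- ===== SOURCE B (Python) =====
-- def rule_friends_logic(world, constants):
--     """Complement counting: every pair is satisfied unless Friends(x,y) holds and
--     exactly one of x,y smokes, so split constants by smoke value and only probe
--     Friends facts across the two groups."""
--     smokers = [c for c in constants if world.get(f"Smokes({c})", False)]
--     nonsmokers = [c for c in constants if not world.get(f"Smokes({c})", False)]
--     unsat = 0
--     for x in smokers:
--         for y in nonsmokers:
--             unsat += world.get(f"Friends({x},{y})", False)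
--             unsat += world.get(f"Friends({y},{x})", False)
--     return len(constants) ** 2 - unsat
-- ===== Notes on version B (the rewrite author's own statement) =====
-- stated objective: faster
-- what changed: B counts by complement: a pair is unsatisfied only when Friends(x,y) holds and exactly one endpoint smokes, so B computes each constant's smoke value once, partitions constants into smokers/non-smokers, probes Friends only across the two groups (in both directions) and returns n^2 minus the unsatisfied count, instead of A's three dict lookups for every ordered pair.
import Mathlib
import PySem

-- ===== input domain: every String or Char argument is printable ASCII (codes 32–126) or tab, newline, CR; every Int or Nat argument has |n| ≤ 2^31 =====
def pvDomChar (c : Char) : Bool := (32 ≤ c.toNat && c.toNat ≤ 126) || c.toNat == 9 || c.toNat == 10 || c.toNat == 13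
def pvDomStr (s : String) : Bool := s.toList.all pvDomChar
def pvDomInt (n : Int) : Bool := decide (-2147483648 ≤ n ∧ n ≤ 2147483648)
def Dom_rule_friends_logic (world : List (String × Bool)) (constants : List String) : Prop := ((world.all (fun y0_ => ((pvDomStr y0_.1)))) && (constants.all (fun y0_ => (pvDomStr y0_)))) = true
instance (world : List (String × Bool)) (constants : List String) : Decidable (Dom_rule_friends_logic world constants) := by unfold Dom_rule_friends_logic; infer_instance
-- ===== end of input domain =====

-- B replaces A's all-pairs scan by complement counting over the smoker/non-smoker partition (fewer dict probes; objective: faster by a constant factor).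

-- ===== PORT A =====
def rule_friends_logic (world : List (String × Bool)) (constants : List String) : Int :=
  constants.foldl (fun count_satisfied x =>
    constants.foldl (fun count_satisfied y =>
      let friends_xy := (PySem.Dict.mk world).getD ("Friends(" ++ x ++ "," ++ y ++ ")") false
      let smokes_x := (PySem.Dict.mk world).getD ("Smokes(" ++ x ++ ")") false
      let smokes_y := (PySem.Dict.mk world).getD ("Smokes(" ++ y ++ ")") false
      let is_satisfied := (!friends_xy) || (smokes_x == smokes_y)
      if is_satisfied then count_satisfied + 1 else count_satisfied) count_satisfied) 0

-- ===== PORT B =====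
def rule_friends_logic_alt (world : List (String × Bool)) (constants : List String) : Int :=
  let smokers := constants.filter (fun c => (PySem.Dict.mk world).getD ("Smokes(" ++ c ++ ")") false)
  let nonsmokers := constants.filter (fun c => !((PySem.Dict.mk world).getD ("Smokes(" ++ c ++ ")") false))
  let unsat := smokers.foldl (fun unsat x =>
    nonsmokers.foldl (fun unsat y =>
      unsat + (if (PySem.Dict.mk world).getD ("Friends(" ++ x ++ "," ++ y ++ ")") false then (1:Int) else 0)
            + (if (PySem.Dict.mk world).getD ("Friends(" ++ y ++ "," ++ x ++ ")") false then (1:Int) else 0)) unsat) 0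
  (constants.length : Int) ^ 2 - unsat

-- ===== PRECONDITION & SPEC =====
def Spec_rule_friends_logic (world : List (String × Bool)) (constants : List String) (out : Int) : Prop := out = rule_friends_logic_alt world constants
instance (world : List (String × Bool)) (constants : List String) (out : Int) : Decidable (Spec_rule_friends_logic world constants out) := by unfold Spec_rule_friends_logic; infer_instance

-- ===== CLAIM (what is proved, stated in full; the proofs are below) =====
def Claim_equal_rule_friends_logic : Prop := ∀ (world : List (String × Bool)) (constants : List String), Dom_rule_friends_logic world constants → Spec_rule_friends_logic world constants (rule_friends_logic world constants)

-- ===== LEMMAS AND PROOFS =====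

theorem pv_sum_map_add {α : Type} (l : List α) (F G : α → Int) :
    (l.map (fun x => F x + G x)).sum = (l.map F).sum + (l.map G).sum := by
  induction l with
  | nil => simp
  | cons a t ih => simp [ih]; ring

theorem pv_sum_map_sub {α : Type} (l : List α) (F G : α → Int) :
    (l.map (fun x => F x - G x)).sum = (l.map F).sum - (l.map G).sum := by
  induction l with
  | nil => simp
  | cons a t ih => simp [ih]; ring

theorem pv_sum_map_partition {α : Type} (l : List α) (p : α → Bool) (F : α → Int) :
    (l.map F).sum = ((l.filter p).map F).sum + ((l.filter (fun x => !p x)).map F).sum := by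
  induction l with
  | nil => simp
  | cons a t ih =>
    by_cases h : p a = true <;> simp [h, ih] <;> ring

theorem pv_sum_comm {α : Type} (l m : List α) (F : α → α → Int) :
    (l.map (fun x => (m.map (F x)).sum)).sum
      = (m.map (fun y => (l.map (fun x => F x y)).sum)).sum := by
  induction l with
  | nil => simp
  | cons a t ih => simp [ih]

-- the A-loop as a nested sum
theorem pv_foldl_count {α : Type} (l : List α) (p : α → Bool) (init : Int) :
    l.foldl (fun c y => if p y then c + 1 else c) init
      = init + (l.map (fun y => if p y then (1:Int) else 0)).sum := by
  have h : (fun (c : Int) y => if p y then c + 1 else c)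
      = (fun (c : Int) y => c + if p y then (1:Int) else 0) := by
    funext c y; split <;> simp
  rw [h, PySem.List.foldl_add]

-- the B-loop as a nested sum
theorem pv_foldl_two {α : Type} (l : List α) (F G : α → Bool) (init : Int) :
    l.foldl (fun u y => u + (if F y then (1:Int) else 0) + (if G y then (1:Int) else 0)) init
      = init + (l.map (fun y => (if F y then (1:Int) else 0) + (if G y then (1:Int) else 0))).sum := by
  have h : (fun (u : Int) y => u + (if F y then (1:Int) else 0) + (if G y then (1:Int) else 0))
      = (fun (u : Int) y => u + ((if F y then (1:Int) else 0) + (if G y then (1:Int) else 0))) := by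
    funext u y; ring
  rw [h, PySem.List.foldl_add]

-- master identity, with the dict lookups abstracted away
theorem pv_master (f : String → String → Bool) (s : String → Bool) (C : List String) :
    C.foldl (fun c x => C.foldl (fun c y =>
        if (!(f x y)) || (s x == s y) then c + 1 else c) c) (0:Int)
      = (C.length : Int) ^ 2 -
        (C.filter (fun c => s c)).foldl (fun u x =>
          (C.filter (fun c => !(s c))).foldl (fun u y =>
            u + (if f x y then (1:Int) else 0) + (if f y x then (1:Int) else 0)) u) 0 := by
  -- LHS to nested sums
  have hL : C.foldl (fun c x => C.foldl (fun c y =>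
        if (!(f x y)) || (s x == s y) then c + 1 else c) c) (0:Int)
      = (C.map (fun x => (C.map (fun y =>
          if (!(f x y)) || (s x == s y) then (1:Int) else 0)).sum)).sum := by
    have h : (fun (c : Int) x => C.foldl (fun c y =>
        if (!(f x y)) || (s x == s y) then c + 1 else c) c)
        = (fun (c : Int) x => c + (C.map (fun y =>
          if (!(f x y)) || (s x == s y) then (1:Int) else 0)).sum) := by
      funext c x; exact pv_foldl_count C _ c
    rw [h, PySem.List.foldl_add]; simp
  -- RHS inner loop to nested sums
  have hR : (C.filter (fun c => s c)).foldl (fun u x =>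
          (C.filter (fun c => !(s c))).foldl (fun u y =>
            u + (if f x y then (1:Int) else 0) + (if f y x then (1:Int) else 0)) u) (0:Int)
      = ((C.filter (fun c => s c)).map (fun x =>
          ((C.filter (fun c => !(s c))).map (fun y =>
            (if f x y then (1:Int) else 0) + (if f y x then (1:Int) else 0))).sum)).sum := by
    have h : (fun (u : Int) x => (C.filter (fun c => !(s c))).foldl (fun u y =>
            u + (if f x y then (1:Int) else 0) + (if f y x then (1:Int) else 0)) u)
        = (fun (u : Int) x => u + ((C.filter (fun c => !(s c))).map (fun y =>
            (if f x y then (1:Int) else 0) + (if f y x then (1:Int) else 0))).sum) := by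
      funext u x; exact pv_foldl_two _ _ _ u
    rw [h, PySem.List.foldl_add]; simp
  rw [hL, hR]
  set S := C.filter (fun c => s c) with hS
  set N := C.filter (fun c => !(s c)) with hN
  have hsS : ∀ x ∈ S, s x = true := by intro x hx; exact (List.mem_filter.mp hx).2
  have hsN : ∀ x ∈ N, s x = false := by
    intro x hx
    simpa using (List.mem_filter.mp hx).2
  -- pointwise: satisfied = 1 - unsatisfied
  have hpt : ∀ x y, (if (!(f x y)) || (s x == s y) then (1:Int) else 0)
      = 1 - (if (f x y && !(s x == s y)) then (1:Int) else 0) := by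
    intro x y
    cases hf : f x y
    · simp [hf]
    · cases hxy : (s x == s y) <;> simp [hf, hxy]
  have h1 : (C.map (fun x => (C.map (fun y =>
        if (!(f x y)) || (s x == s y) then (1:Int) else 0)).sum)).sum
      = (C.length : Int) ^ 2 - (C.map (fun x => (C.map (fun y =>
        if (f x y && !(s x == s y)) then (1:Int) else 0)).sum)).sum := by
    have hinner : ∀ x, (C.map (fun y =>
        if (!(f x y)) || (s x == s y) then (1:Int) else 0)).sum
        = (C.length : Int) - (C.map (fun y =>
        if (f x y && !(s x == s y)) then (1:Int) else 0)).sum := by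
      intro x
      have := pv_sum_map_sub C (fun _ => (1:Int))
        (fun y => if (f x y && !(s x == s y)) then (1:Int) else 0)
      rw [List.map_congr_left (fun y _ => hpt x y), this]
      simp
    rw [List.map_congr_left (fun x _ => hinner x),
        pv_sum_map_sub C (fun _ => (C.length : Int)) _]
    simp; ring
  rw [h1]
  congr 1
  -- split the unsatisfied double sum by the smoker partition
  have hsplit_inner : ∀ (g : String → Int),
      (C.map g).sum = ((S.map g).sum + (N.map g).sum) := by
    intro g; rw [hS, hN]; exact pv_sum_map_partition C (fun c => s c) g
  rw [hsplit_inner]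
  have hSx : (S.map (fun x => (C.map (fun y =>
      if (f x y && !(s x == s y)) then (1:Int) else 0)).sum)).sum
      = (S.map (fun x => (N.map (fun y => if f x y then (1:Int) else 0)).sum)).sum := by
    apply congrArg
    apply List.map_congr_left
    intro x hx
    rw [hsplit_inner]
    have hzS : (S.map (fun y => if (f x y && !(s x == s y)) then (1:Int) else 0)).sum = 0 := by
      have : ∀ y ∈ S, (if (f x y && !(s x == s y)) then (1:Int) else 0) = 0 := by
        intro y hy; simp [hsS x hx, hsS y hy]
      rw [List.map_congr_left this]; simp
    have hcN : ∀ y ∈ N, (if (f x y && !(s x == s y)) then (1:Int) else 0)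
        = (if f x y then (1:Int) else 0) := by
      intro y hy; simp [hsS x hx, hsN y hy]
    rw [hzS, List.map_congr_left hcN]; ring
  have hNx : (N.map (fun x => (C.map (fun y =>
      if (f x y && !(s x == s y)) then (1:Int) else 0)).sum)).sum
      = (S.map (fun x => (N.map (fun y => if f y x then (1:Int) else 0)).sum)).sum := by
    have h2 : (N.map (fun x => (C.map (fun y =>
        if (f x y && !(s x == s y)) then (1:Int) else 0)).sum)).sum
        = (N.map (fun x => (S.map (fun y => if f x y then (1:Int) else 0)).sum)).sum := by
      apply congrArg
      apply List.map_congr_left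
      intro x hx
      rw [hsplit_inner]
      have hzN : (N.map (fun y => if (f x y && !(s x == s y)) then (1:Int) else 0)).sum = 0 := by
        have : ∀ y ∈ N, (if (f x y && !(s x == s y)) then (1:Int) else 0) = 0 := by
          intro y hy; simp [hsN x hx, hsN y hy]
        rw [List.map_congr_left this]; simp
      have hcS : ∀ y ∈ S, (if (f x y && !(s x == s y)) then (1:Int) else 0)
          = (if f x y then (1:Int) else 0) := by
        intro y hy; simp [hsN x hx, hsS y hy]
      rw [hzN, List.map_congr_left hcS]; ring
    rw [h2, pv_sum_comm N S (fun x y => if f x y then (1:Int) else 0)]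
  rw [hSx, hNx, ← pv_sum_map_add]
  apply congrArg
  apply List.map_congr_left
  intro x _
  rw [← pv_sum_map_add]

-- ===== VERDICT (by name: the statement is the Claim_ definition above) =====
theorem rule_friends_logic_spec : Claim_equal_rule_friends_logic := by
  intro world constants _
  unfold Spec_rule_friends_logic rule_friends_logic rule_friends_logic_alt
  exact pv_master
    (fun x y => (PySem.Dict.mk world).getD ("Friends(" ++ x ++ "," ++ y ++ ")") false)
    (fun c => (PySem.Dict.mk world).getD ("Smokes(" ++ c ++ ")") false)
    constants
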